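-- pv_equiv track=rewrite | github.com/nrw505/adventofcode-2019 | day4/part2.py | candidates_starting_with
-- ===== SOURCE A (Python) =====
-- def candidates_starting_with(start):
--     if len(start) > 5:
--         return [start]
--     last_digit = int(start[-1])
--     next_steps = [start + str(x) for x in range(last_digit, 10)]
--     flat = []
--     for x in next_steps:
--         flat += candidates_starting_with(x)
--     return flat
-- ===== SOURCE B (Python) =====
-- def candidates_starting_with(start):
--     if len(start) > 5:
--         return [start]
--     items = [(int(start[-1]), "")]
--     for _ in range(6 - len(start)):
--         items = [(y, suffix + str(y)) for (low, suffix) in items for y in range(low, 10)]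
--     return [start + suffix for (_, suffix) in items]
-- ===== Notes on version B (the rewrite author's own statement) =====
-- stated objective: simpler
-- what changed: Replaced A's recursive tree descent (one recursive call per appended digit, concatenating sublists) by a single iterative loop that extends all partial suffixes one digit per round, producing the same lexicographically ordered list.
import Mathlib
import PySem

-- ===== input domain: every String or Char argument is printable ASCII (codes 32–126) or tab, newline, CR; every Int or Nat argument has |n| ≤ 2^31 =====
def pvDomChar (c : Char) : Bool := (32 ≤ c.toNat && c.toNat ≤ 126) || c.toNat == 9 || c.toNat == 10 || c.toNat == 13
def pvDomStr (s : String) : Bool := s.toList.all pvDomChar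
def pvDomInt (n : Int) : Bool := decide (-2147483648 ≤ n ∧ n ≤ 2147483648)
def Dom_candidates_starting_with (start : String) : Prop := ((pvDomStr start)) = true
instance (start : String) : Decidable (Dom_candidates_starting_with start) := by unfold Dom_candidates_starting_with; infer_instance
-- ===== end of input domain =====

-- B replaces A's recursive tree descent by an iterative level-by-level product over the same
-- digit ranges, extending every partial suffix by one digit per round in the same
-- lexicographic order; objective: simpler (no speed claim).

-- Both ports work on `start.toList` (PySem string primitives are defined on `List Char`).
-- `int(s[-1])` of both Pythons, totalized: on inputs where Python raises (empty string /
-- non-digit last char, excluded by Pre_) it returns a default.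
def pvLastDigit (cs : List Char) : Int :=
  (PySem.Int.ofChars? [(PySem.List.pyGet? cs (-1)).getD '0']).getD 0

-- termination helpers for the recursion of port A (`start + str(x)` is strictly longer)
theorem pvTdcNeNil : ∀ (f n : Nat) (acc : List Char), Nat.toDigitsCore 10 (f+1) n acc ≠ [] := by
  intro f
  induction f with
  | zero => intro n acc; simp [Nat.toDigitsCore]
  | succ f ih =>
    intro n acc
    rw [Nat.toDigitsCore]
    split
    · simp
    · exact ih _ _

theorem pvToCharsNeNil (n : Int) : PySem.Int.toChars n ≠ [] := by
  unfold PySem.Int.toChars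
  split
  · simp
  · exact pvTdcNeNil _ _ _

-- ===== PORT A =====
-- literal transliteration of A: guard `len(start) > 5`, `last_digit = int(start[-1])`,
-- `next_steps = [start + str(x) for x in range(last_digit, 10)]`, then `flat += rec(x)`.
def candA (cs : List Char) : List String :=
  if _h : (cs.length : Int) > 5 then [String.ofList cs]
  else
    let last_digit : Int := pvLastDigit cs
    let next_steps := (PySem.List.pyRange last_digit 10 1).map (fun x => cs ++ PySem.Int.toChars x)
    next_steps.attach.foldl (fun flat x => flat ++ candA x.1) []
termination_by 6 - cs.length
decreasing_by
  obtain ⟨y, hy⟩ := List.mem_map.mp x.2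
  have h1 : x.1.length = cs.length + (PySem.Int.toChars y).length := by
    rw [← hy.2]; simp
  have h2 : (PySem.Int.toChars y).length ≠ 0 := by
    simpa using pvToCharsNeNil y
  omega

def candidates_starting_with (start : String) : List String := candA start.toList

-- ===== PORT B =====
-- literal transliteration of B: seed item `(int(start[-1]), "")`, then `6 - len(start)` rounds of
-- `[(y, suffix + str(y)) for (low, suffix) in items for y in range(low, 10)]`.
def candidates_starting_with_alt (start : String) : List String :=
  if (start.toList.length : Int) > 5 then [start]
  else
    let items := (PySem.List.pyRange 0 (6 - (start.toList.length : Int)) 1).foldl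
      (fun items _ => items.flatMap (fun p =>
        (PySem.List.pyRange p.1 10 1).map (fun y => (y, p.2 ++ PySem.Int.toChars y))))
      [(pvLastDigit start.toList, ([] : List Char))]
    items.map (fun p => String.ofList (start.toList ++ p.2))

-- ===== PRECONDITION & SPEC =====
-- Pre_ excludes exactly the inputs on which Python A raises: strings of length ≤ 5 that are
-- empty (IndexError on start[-1]) or whose last character is not a digit (ValueError in int()).
def Pre_candidates_starting_with (start : String) : Prop :=
  5 < start.toList.length ∨
    (start.toList ≠ [] ∧ (start.toList.getLast?.getD ' ').isDigit = true)
instance (start : String) : Decidable (Pre_candidates_starting_with start) := by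
  unfold Pre_candidates_starting_with; infer_instance

def pvWitness_candidates_starting_with : String := "13"

def Spec_candidates_starting_with (start : String) (out : List String) : Prop := out = candidates_starting_with_alt start
instance (start : String) (out : List String) : Decidable (Spec_candidates_starting_with start out) := by unfold Spec_candidates_starting_with; infer_instance

-- ===== CLAIM (what is proved, stated in full; the proofs are below) =====
def Claim_equal_candidates_starting_with : Prop := ∀ (start : String), Dom_candidates_starting_with start → Pre_candidates_starting_with start → Spec_candidates_starting_with start (candidates_starting_with start)

-- ===== LEMMAS AND PROOFS =====

-- combinations_with_replacement over xs with r slots, in lexicographic order (proof-only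
-- device: both ports' outputs are shown equal to a map over `cwr`)
def cwr : List Int → Nat → List (List Int)
  | _, 0 => [[]]
  | [], _ + 1 => []
  | x :: rest, k + 1 => (cwr (x :: rest) k).map (x :: ·) ++ cwr rest (k + 1)
termination_by xs k => (k, xs.length)

-- last element of a digit sequence, or the seed digit while it is empty
def lastD (c : List Int) (d : Int) : Int := c.getLast?.getD d

theorem cwr_one (xs : List Int) : cwr xs 1 = xs.map ([·]) := by
  induction xs with
  | nil => simp [cwr]
  | cons x rest ih => rw [cwr, ih]; simp [cwr]

theorem cwr_flat_aux (k : Nat) : ∀ (n : Nat) (d : Int), (10 - d).toNat ≤ n →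
    cwr (PySem.List.pyRange d 10 1) (k+1) =
      (PySem.List.pyRange d 10 1).flatMap (fun x => (cwr (PySem.List.pyRange x 10 1) k).map (x :: ·)) := by
  intro n
  induction n with
  | zero =>
    intro d h
    rw [PySem.List.pyRange_one_eq_nil (by omega)]
    cases k <;> simp [cwr]
  | succ n ih =>
    intro d h
    by_cases hd : (10:Int) ≤ d
    · rw [PySem.List.pyRange_one_eq_nil (by omega)]; cases k <;> simp [cwr]
    · rw [PySem.List.pyRange_one_cons (by omega : d < 10)]
      rw [cwr]
      rw [List.flatMap_cons]
      rw [ih (d+1) (by omega)]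
      rw [← PySem.List.pyRange_one_cons (by omega : d < 10)]

theorem cwr_flat (k : Nat) (d : Int) :
    cwr (PySem.List.pyRange d 10 1) (k+1) =
      (PySem.List.pyRange d 10 1).flatMap (fun x => (cwr (PySem.List.pyRange x 10 1) k).map (x :: ·)) :=
  cwr_flat_aux k (10 - d).toNat d le_rfl

theorem cwr_snoc (j : Nat) : ∀ (d : Int),
    cwr (PySem.List.pyRange d 10 1) (j+1) =
      (cwr (PySem.List.pyRange d 10 1) j).flatMap
        (fun c => (PySem.List.pyRange (lastD c d) 10 1).map (fun y => c ++ [y])) := by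
  induction j with
  | zero =>
    intro d
    rw [cwr_one]
    simp [cwr, lastD]
  | succ j ih =>
    intro d
    rw [cwr_flat (j+1) d, cwr_flat j d]
    simp only [List.flatMap_assoc, List.flatMap_map]
    apply List.flatMap_congr
    intro x hx
    rw [ih x]
    simp only [List.map_flatMap]
    apply List.flatMap_congr
    intro c hc
    have hl : lastD (x :: c) d = lastD c x := by
      cases c with
      | nil => simp [lastD]
      | cons a b =>
        simp only [lastD]
        obtain ⟨v, hv⟩ := List.getLast?_isSome.mpr (by simp : (a :: b) ≠ []) |> Option.isSome_iff_exists.mp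
        rw [List.getLast?_cons_cons, hv]
        simp
    rw [hl]
    simp

theorem pvLastDigit_append_single (cs : List Char) (c : Char) (x : Int)
    (h1 : PySem.Int.toChars x = [c]) (h2 : PySem.Int.ofChars? [c] = some x) :
    pvLastDigit (cs ++ PySem.Int.toChars x) = x := by
  rw [pvLastDigit, h1, PySem.List.pyGet?_neg_one_append_singleton]
  simp [h2]

-- `str(x)` of a single digit: one character, and `int((s + str(x))[-1])` reads x back
theorem digit_facts (x : Int) (h0 : 0 ≤ x) (h9 : x ≤ 9) :
    (PySem.Int.toChars x).length = 1 ∧ (∀ cs : List Char, pvLastDigit (cs ++ PySem.Int.toChars x) = x) := by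
  interval_cases x <;>
    exact ⟨by decide, fun cs => pvLastDigit_append_single cs _ _ rfl (by decide)⟩

theorem digit_cases (c : Char) (h : c.isDigit = true) :
    c = '0' ∨ c = '1' ∨ c = '2' ∨ c = '3' ∨ c = '4' ∨ c = '5' ∨ c = '6' ∨ c = '7' ∨ c = '8' ∨ c = '9' := by
  simp only [Char.isDigit, Bool.and_eq_true, decide_eq_true_eq] at h
  obtain ⟨h1, h2⟩ := h
  have h1' : 48 ≤ c.val.toNat := h1
  have h2' : c.val.toNat ≤ 57 := h2
  interval_cases h : c.val.toNat <;> simp [Char.ext_iff, ← UInt32.toNat_inj, h]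

-- A's recursion produces exactly the cwr suffixes, in lexicographic order
theorem candA_eq : ∀ (k : Nat) (cs : List Char) (d : Int), cs.length + k = 6 → 0 ≤ d → d ≤ 9 →
    pvLastDigit cs = d →
    candA cs = (cwr (PySem.List.pyRange d 10 1) k).map
      (fun c => String.ofList (cs ++ (c.map PySem.Int.toChars).flatten)) := by
  intro k
  induction k with
  | zero =>
    intro cs d hlen _ _ _
    rw [candA, dif_pos (by omega)]
    simp [cwr]
  | succ k ih =>
    intro cs d hlen h0 h9 hld
    rw [candA, dif_neg (by omega)]
    simp only
    rw [hld]
    rw [List.foldl_attach (f := fun acc c => acc ++ candA c)]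
    rw [PySem.List.foldl_append_eq_flatMap]
    rw [List.nil_append, List.flatMap_map]
    rw [cwr_flat k d, List.map_flatMap]
    apply List.flatMap_congr
    intro x hx
    have hx' := (PySem.List.mem_pyRange_one).mp hx
    obtain ⟨hc1, hc2⟩ := digit_facts x (by omega) (by omega)
    rw [ih (cs ++ PySem.Int.toChars x) x (by simp [hc1]; omega) (by omega) (by omega) (hc2 cs)]
    rw [List.map_map]
    apply List.map_congr_left
    intro c _
    simp

-- B's loop invariant: after j rounds the items are the cwr suffixes of length j, each with its
-- last digit (or the seed digit d while empty)
theorem foldB (j : Nat) (d : Int) :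
    (List.range j).foldl
      (fun items _ => items.flatMap (fun p : Int × List Char =>
        (PySem.List.pyRange p.1 10 1).map (fun y => (y, p.2 ++ PySem.Int.toChars y))))
      [(d, ([] : List Char))]
    = (cwr (PySem.List.pyRange d 10 1) j).map
        (fun c => (lastD c d, (c.map PySem.Int.toChars).flatten)) := by
  induction j with
  | zero => simp [cwr, lastD]
  | succ j ih =>
    rw [List.range_succ, List.foldl_append, ih]
    simp only [List.foldl_cons, List.foldl_nil]
    rw [cwr_snoc j d]
    rw [List.flatMap_map, List.map_flatMap]
    apply List.flatMap_congr
    intro c hc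
    simp only [List.map_map]
    apply List.map_congr_left
    intro y hy
    simp [lastD]

-- foldB restated over the Int-valued range the port uses
theorem foldB' (m : Int) (d : Int) :
    (PySem.List.pyRange 0 m 1).foldl
      (fun items _ => items.flatMap (fun p : Int × List Char =>
        (PySem.List.pyRange p.1 10 1).map (fun y => (y, p.2 ++ PySem.Int.toChars y))))
      [(d, ([] : List Char))]
    = (cwr (PySem.List.pyRange d 10 1) m.toNat).map
        (fun c => (lastD c d, (c.map PySem.Int.toChars).flatten)) := by
  rw [PySem.List.pyRange_one, List.foldl_map]
  simp only [Int.sub_zero]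
  exact foldB m.toNat d

-- both sides of the claim, for any admitted short input
theorem topEq (cs : List Char) (d : Int) (hlen : cs.length ≤ 5) (h0 : 0 ≤ d) (h9 : d ≤ 9)
    (hld : pvLastDigit cs = d) :
    candA cs = ((PySem.List.pyRange 0 (6 - (cs.length : Int)) 1).foldl
        (fun items _ => items.flatMap (fun p : Int × List Char =>
          (PySem.List.pyRange p.1 10 1).map (fun y => (y, p.2 ++ PySem.Int.toChars y))))
        [(pvLastDigit cs, ([] : List Char))]).map (fun p => String.ofList (cs ++ p.2)) := by
  rw [hld, foldB']
  have hm : ((6:Int) - (cs.length : Int)).toNat = 6 - cs.length := by omega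
  rw [hm]
  rw [candA_eq (6 - cs.length) cs d (by omega) h0 h9 hld]
  rw [List.map_map]
  rfl

-- the last character being a digit bounds pvLastDigit
theorem pvLastDigit_bounds (cs : List Char) (hne : cs ≠ [])
    (hdig : (cs.getLast?.getD ' ').isDigit = true) :
    0 ≤ pvLastDigit cs ∧ pvLastDigit cs ≤ 9 := by
  rw [List.getLast?_eq_some_getLast hne] at hdig
  simp only [Option.getD_some] at hdig
  have hget : pvLastDigit cs = (PySem.Int.ofChars? [cs.getLast hne]).getD 0 := by
    rw [pvLastDigit, PySem.List.pyGet?_neg_one cs, List.getLast?_eq_some_getLast hne]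
    rfl
  rcases digit_cases _ hdig with h|h|h|h|h|h|h|h|h|h <;> rw [hget, h] <;> exact ⟨by decide, by decide⟩

-- ===== VERDICT (by name: the statement is the Claim_ definition above) =====
theorem candidates_starting_with_spec : Claim_equal_candidates_starting_with := by
  intro start _hDom hPre
  unfold Spec_candidates_starting_with candidates_starting_with candidates_starting_with_alt
  by_cases hlen : ((start.toList.length : Int) > 5)
  · rw [candA, dif_pos hlen, if_pos hlen, String.ofList_toList]
  · rw [if_neg hlen]
    simp only
    have hne : start.toList ≠ [] := by
      rcases hPre with h | h
      · intro h0; rw [h0] at h; simp at h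
      · exact h.1
    have hdig : (start.toList.getLast?.getD ' ').isDigit = true := by
      rcases hPre with h | h
      · exfalso; omega
      · exact h.2
    obtain ⟨hb0, hb9⟩ := pvLastDigit_bounds start.toList hne hdig
    exact topEq start.toList (pvLastDigit start.toList) (by omega) hb0 hb9 rfl
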